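-- pv_equiv track=rewrite | github.com/Alfiya-Simran/Mini-PC-voice-assistant | assistant.py | process_spoken_text
-- ===== SOURCE A (Python) =====
-- def process_spoken_text(text):
--     replacements = {
--         " comma": ",",
--         " period": ".",
--         " question mark": "?",
--         " exclamation mark": "!",
--         " new line": "\n",
--         " next line": "\n",
--         " colon": ":",
--         " semicolon": ";",
--         " dash": "-",
--         " open bracket": "(",
--         " close bracket": ")",
--         " slash": "/",
--         " backslash": "\\"
--     }
--     for word, symbol in replacements.items():
--         text = text.replace(word, symbol)
--     return text
-- ===== SOURCE B (Python) =====
-- def process_spoken_text(text):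
--     table = [
--         (" comma", ","),
--         (" period", "."),
--         (" question mark", "?"),
--         (" exclamation mark", "!"),
--         (" new line", "\n"),
--         (" next line", "\n"),
--         (" colon", ":"),
--         (" semicolon", ";"),
--         (" dash", "-"),
--         (" open bracket", "("),
--         (" close bracket", ")"),
--         (" slash", "/"),
--         (" backslash", "\\"),
--     ]
--     out = []
--     i = 0
--     n = len(text)
--     while i < n:
--         for word, sym in table:
--             if text.startswith(word, i):
--                 out.append(sym)
--                 i += len(word)
--                 break
--         else:
--             out.append(text[i])
--             i += 1
--     return "".join(out)
-- ===== Notes on version B (the rewrite author's own statement) =====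
-- stated objective: alternative
-- what changed: A runs 13 sequential full-string replace passes (one per spoken-punctuation key); B makes a single left-to-right scan over the text, emitting at each position either the symbol of the first table key that matches there (skipping the key) or the current character.
import Mathlib
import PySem

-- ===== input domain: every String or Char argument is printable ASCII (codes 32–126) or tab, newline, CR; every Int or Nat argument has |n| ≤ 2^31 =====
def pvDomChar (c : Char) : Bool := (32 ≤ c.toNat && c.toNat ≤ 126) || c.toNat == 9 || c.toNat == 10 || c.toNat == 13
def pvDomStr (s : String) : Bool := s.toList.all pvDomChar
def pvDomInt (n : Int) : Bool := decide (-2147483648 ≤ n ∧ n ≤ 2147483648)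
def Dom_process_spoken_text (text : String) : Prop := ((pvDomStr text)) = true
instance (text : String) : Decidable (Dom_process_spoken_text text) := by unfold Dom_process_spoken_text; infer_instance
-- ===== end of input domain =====

-- B replaces A's 13 sequential full-string replace passes by a single left-to-right scan that
-- tries the table keys at each position (objective: alternative single-pass algorithm; not faster in CPython).

-- ===== PORT A =====
def pvReplacements : PySem.Dict String String := PySem.Dict.mk [
  (" comma", ","), (" period", "."), (" question mark", "?"), (" exclamation mark", "!"),
  (" new line", "\n"), (" next line", "\n"), (" colon", ":"), (" semicolon", ";"),
  (" dash", "-"), (" open bracket", "("), (" close bracket", ")"), (" slash", "/"),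
  (" backslash", "\\")]

def process_spoken_text (text : String) : String :=
  pvReplacements.items.foldl (fun t kv => PySem.Str.replace t kv.1 kv.2) text

-- ===== PORT B =====
def pvTable : List (List Char × List Char) := [
  (" comma".toList, ",".toList), (" period".toList, ".".toList),
  (" question mark".toList, "?".toList), (" exclamation mark".toList, "!".toList),
  (" new line".toList, "\n".toList), (" next line".toList, "\n".toList),
  (" colon".toList, ":".toList), (" semicolon".toList, ";".toList),
  (" dash".toList, "-".toList), (" open bracket".toList, "(".toList),
  (" close bracket".toList, ")".toList), (" slash".toList, "/".toList),
  (" backslash".toList, "\\".toList)]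

-- termination helper for pvScan (cited in decreasing_by)
lemma pvTable_key_pos : ∀ kv ∈ pvTable, 0 < kv.1.length := by decide

-- the while-loop of Source B: one pass, first matching table key wins, else copy one char
def pvScan (s : List Char) : List Char :=
  match s with
  | [] => []
  | c :: t =>
    match hf : pvTable.find? (fun kv => kv.1.isPrefixOf (c :: t)) with
    | some kv => kv.2 ++ pvScan (List.drop kv.1.length (c :: t))
    | none => c :: pvScan t
termination_by s.length
decreasing_by
  · have hp := pvTable_key_pos _ (List.mem_of_find?_eq_some hf)
    simp only [List.length_drop, List.length_cons]
    omega
  · simp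

def process_spoken_text_alt (text : String) : String := String.ofList (pvScan text.toList)

-- ===== PRECONDITION & SPEC =====
def Spec_process_spoken_text (text : String) (out : String) : Prop := out = process_spoken_text_alt text
instance (text : String) (out : String) : Decidable (Spec_process_spoken_text text out) := by unfold Spec_process_spoken_text; infer_instance

-- ===== CLAIM (what is proved, stated in full; the proofs are below) =====
def Claim_equal_process_spoken_text : Prop := ∀ (text : String), Dom_process_spoken_text text → Spec_process_spoken_text text (process_spoken_text text)

-- ===== LEMMAS AND PROOFS =====

-- characters that may occur in a table key (space and lowercase letters);
-- every replacement value is a single non-key character, which is why the passes cannot interact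
def keyChar (c : Char) : Bool := c == ' ' || (decide ('a' ≤ c) && decide (c ≤ 'z'))

def goodPair (kv : List Char × List Char) : Bool :=
  !kv.1.isEmpty && kv.1.all keyChar && (match kv.2 with | [x] => !keyChar x | _ => false)

def goodTable (T : List (List Char × List Char)) : Bool := T.all goodPair

-- no occurrence of k may start strictly inside an occurrence of ki (nor coincide with it)
def noStraddle (k ki : List Char) : Bool :=
  (List.range ki.length).all (fun d => !(List.isPrefixOf k (List.drop d ki)) && !(List.isPrefixOf (List.drop d ki) k))

def sepTable (T : List (List Char × List Char)) : Bool :=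
  T.all (fun a => T.all (fun b => a == b || noStraddle a.1 b.1))

lemma good_pvTable : goodTable pvTable = true := by decide
lemma sep_pvTable : sepTable pvTable = true := by decide

lemma goodPair_spec (kv : List Char × List Char) (h : goodPair kv = true) :
    kv.1 ≠ [] ∧ kv.1.all keyChar = true ∧ ∃ x, kv.2 = [x] ∧ keyChar x = false := by
  obtain ⟨k, v⟩ := kv
  simp only [goodPair, Bool.and_eq_true, Bool.not_eq_true'] at h
  obtain ⟨⟨h1, h2⟩, h3⟩ := h
  refine ⟨by simpa [List.isEmpty_iff] using h1, h2, ?_⟩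
  match v, h3 with
  | [x], h3 => exact ⟨x, rfl, by simpa using h3⟩

lemma good_mem {kv : List Char × List Char} (hm : kv ∈ pvTable) :
    kv.1 ≠ [] ∧ kv.1.all keyChar = true ∧ ∃ x, kv.2 = [x] ∧ keyChar x = false :=
  goodPair_spec kv (List.all_eq_true.mp good_pvTable kv hm)

lemma sep_mem {a b : List Char × List Char} (ha : a ∈ pvTable) (hb : b ∈ pvTable) :
    a = b ∨ noStraddle a.1 b.1 = true := by
  have h := List.all_eq_true.mp (List.all_eq_true.mp sep_pvTable a ha) b hb
  rcases Bool.or_eq_true_iff.mp h with h | h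
  · exact Or.inl (by simpa using h)
  · exact Or.inr h

-- ---- Chars.replace unfolding lemmas ----

lemma go_zero (old new l acc : List Char) : PySem.Chars.replace.go old new 0 l acc = acc.reverse ++ l := by
  rw [PySem.Chars.replace.go.eq_def]

lemma go_succ_nil (old new : List Char) (fuel : Nat) (acc : List Char) :
    PySem.Chars.replace.go old new (fuel+1) [] acc = acc.reverse := by
  rw [PySem.Chars.replace.go.eq_def]

lemma go_succ_cons (old new : List Char) (fuel : Nat) (c : Char) (t acc : List Char) :
    PySem.Chars.replace.go old new (fuel+1) (c::t) acc =
      if old.isPrefixOf (c::t) then PySem.Chars.replace.go old new fuel (List.drop old.length (c::t)) (new.reverse ++ acc)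
      else PySem.Chars.replace.go old new fuel t (c :: acc) := by
  conv_lhs => rw [PySem.Chars.replace.go.eq_def]

lemma replace_unfold (s old new : List Char) (h : old ≠ []) :
    PySem.Chars.replace s old new = PySem.Chars.replace.go old new s.length s [] := by
  unfold PySem.Chars.replace
  simp [List.isEmpty_iff, h]

lemma go_acc (old new : List Char) (hold : old ≠ []) :
    ∀ (fuel : Nat) (l acc : List Char), l.length ≤ fuel →
      PySem.Chars.replace.go old new fuel l acc = acc.reverse ++ PySem.Chars.replace.go old new l.length l [] := by
  intro fuel
  induction fuel using Nat.strong_induction_on with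
  | _ fuel ih =>
    match fuel with
    | 0 =>
      intro l acc hl
      have hnil : l = [] := by cases l <;> simp_all
      subst hnil
      simp [go_zero]
    | fuel+1 =>
      intro l acc hl
      cases l with
      | nil => simp [go_succ_nil, go_zero]
      | cons c t =>
        have holdpos : 0 < old.length := by cases old <;> simp_all
        have htlen : t.length ≤ fuel := by simpa using hl
        by_cases hp : old.isPrefixOf (c::t) = true
        · have hdlen : (List.drop old.length (c::t)).length ≤ fuel := by
            simp only [List.length_drop, List.length_cons]; omega
          rw [go_succ_cons, if_pos hp]
          rw [show (c::t).length = t.length + 1 by simp, go_succ_cons, if_pos hp]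
          rw [ih fuel (by omega) _ _ hdlen,
              ih t.length (by omega) _ _ (by simp only [List.length_drop, List.length_cons]; omega)]
          simp
        · rw [go_succ_cons, if_neg hp]
          rw [show (c::t).length = t.length + 1 by simp, go_succ_cons, if_neg hp]
          rw [ih fuel (by omega) _ _ htlen, ih t.length (by omega) t [c] le_rfl]
          simp

lemma replace_nil (old new : List Char) (h : old ≠ []) : PySem.Chars.replace [] old new = [] := by
  rw [replace_unfold _ _ _ h]
  simp [go_zero]

lemma replace_cons_neg (c : Char) (t old new : List Char) (h : old ≠ []) (hp : ¬ old <+: (c::t)) :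
    PySem.Chars.replace (c::t) old new = c :: PySem.Chars.replace t old new := by
  rw [replace_unfold _ _ _ h, replace_unfold _ _ _ h]
  rw [show (c::t).length = t.length + 1 by simp, go_succ_cons,
      if_neg (by simpa [List.isPrefixOf_iff_prefix] using hp)]
  rw [go_acc old new h t.length t [c] le_rfl]
  simp

lemma replace_append_pos (old new r : List Char) (h : old ≠ []) :
    PySem.Chars.replace (old ++ r) old new = new ++ PySem.Chars.replace r old new := by
  cases old with
  | nil => exact absurd rfl h
  | cons o os =>
    rw [replace_unfold _ _ _ h, replace_unfold _ _ _ h]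
    have hcons : (o::os) ++ r = o :: (os ++ r) := rfl
    have hpre : (o::os).isPrefixOf (o :: (os ++ r)) = true := by
      rw [List.isPrefixOf_iff_prefix, ← hcons]; exact List.prefix_append _ _
    have hdrop : List.drop (o::os).length (o :: (os ++ r)) = r := by
      rw [← hcons]; exact List.drop_left
    rw [hcons, show (o :: (os ++ r)).length = (os ++ r).length + 1 by simp, go_succ_cons,
        if_pos hpre, hdrop]
    rw [go_acc _ _ h _ r _ (by simp)]
    simp

-- ---- non-interaction lemmas ----

lemma not_prefix_append {u k : List Char} (h1 : ¬ u <+: k) (h2 : ¬ k <+: u) (r : List Char) :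
    ¬ k <+: u ++ r := fun h =>
  (List.prefix_or_prefix_of_prefix h (List.prefix_append u r)).elim h2 h1

lemma not_prefix_replace (old : List Char) (x : Char) (hold : old ≠ []) (hx : keyChar x = false) :
    ∀ (t p : List Char), p ≠ [] → p.all keyChar = true → ¬ p <+: t →
      ¬ p <+: PySem.Chars.replace t old [x] := by
  intro t
  induction t with
  | nil =>
    intro p hp _ _
    rw [replace_nil _ _ hold]
    simpa [List.prefix_nil] using hp
  | cons c t ih =>
    intro p hp hall hnp
    by_cases hpre : old <+: (c::t)
    · obtain ⟨r, hr⟩ := hpre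
      rw [← hr, replace_append_pos _ _ _ hold]
      intro hcontra
      cases p with
      | nil => exact hp rfl
      | cons p0 p1 =>
        obtain ⟨hp0, _⟩ := List.cons_prefix_cons.mp hcontra
        subst hp0
        have : keyChar p0 = true := by simp [List.all_cons] at hall; exact hall.1
        rw [hx] at this; exact Bool.false_ne_true this
    · rw [replace_cons_neg _ _ _ _ hold hpre]
      intro hcontra
      cases p with
      | nil => exact hp rfl
      | cons p0 p1 =>
        obtain ⟨hp0, hp1⟩ := List.cons_prefix_cons.mp hcontra
        subst hp0
        cases p1 with
        | nil => exact hnp (by simp)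
        | cons q0 q1 =>
          have hnp1 : ¬ (q0::q1) <+: t := by
            intro hq; exact hnp (List.cons_prefix_cons.mpr ⟨rfl, hq⟩)
          have hall1 : (q0::q1).all keyChar = true := by
            simp [List.all_cons] at hall ⊢; exact hall.2
          exact ih (q0::q1) (by simp) hall1 hnp1 hp1

lemma not_prefix_cons_replace (old : List Char) (x : Char) (c : Char) (t p : List Char)
    (hold : old ≠ []) (hx : keyChar x = false) (hp : p ≠ []) (hall : p.all keyChar = true)
    (hnp : ¬ p <+: (c::t)) : ¬ p <+: c :: PySem.Chars.replace t old [x] := by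
  cases p with
  | nil => exact absurd rfl hp
  | cons p0 p1 =>
    intro hcontra
    obtain ⟨hp0, hp1⟩ := List.cons_prefix_cons.mp hcontra
    subst hp0
    cases p1 with
    | nil => exact hnp (by simp)
    | cons q0 q1 =>
      have hnp1 : ¬ (q0::q1) <+: t := by
        intro hq; exact hnp (List.cons_prefix_cons.mpr ⟨rfl, hq⟩)
      have hall1 : (q0::q1).all keyChar = true := by
        simp [List.all_cons] at hall ⊢; exact hall.2
      exact not_prefix_replace old x hold hx t (q0::q1) (by simp) hall1 hnp1 hp1

lemma key_not_prefix_sym (k : List Char) (x : Char) (Y : List Char)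
    (hk : k ≠ []) (hall : k.all keyChar = true) (hx : keyChar x = false) : ¬ k <+: x :: Y := by
  cases k with
  | nil => exact absurd rfl hk
  | cons k0 k1 =>
    intro h
    obtain ⟨h0, _⟩ := List.cons_prefix_cons.mp h
    subst h0
    have : keyChar k0 = true := by simp [List.all_cons] at hall; exact hall.1
    rw [hx] at this; exact Bool.false_ne_true this

lemma noStraddle_tail {k : List Char} {a : Char} {ki : List Char}
    (h : noStraddle k (a::ki) = true) : noStraddle k ki = true := by
  simp only [noStraddle, List.all_eq_true, List.mem_range] at h ⊢
  intro d hd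
  have := h (d+1) (by simpa using Nat.succ_lt_succ hd)
  simpa [List.drop_succ_cons] using this

lemma noStraddle_zero {k ki : List Char} (hki : ki ≠ []) (h : noStraddle k ki = true) :
    ¬ k <+: ki ∧ ¬ ki <+: k := by
  simp only [noStraddle, List.all_eq_true, List.mem_range] at h
  obtain ⟨h1, h2⟩ := (by simpa using h 0 (by cases ki <;> simp_all) :
    k.isPrefixOf ki = false ∧ ki.isPrefixOf k = false)
  refine ⟨fun hc => ?_, fun hc => ?_⟩
  · rw [← List.isPrefixOf_iff_prefix] at hc; rw [h1] at hc; exact Bool.false_ne_true hc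
  · rw [← List.isPrefixOf_iff_prefix] at hc; rw [h2] at hc; exact Bool.false_ne_true hc

-- ---- the chain of replaces (A's fold) ----

def chainL (T : List (List Char × List Char)) (s : List Char) : List Char :=
  T.foldl (fun s kv => PySem.Chars.replace s kv.1 kv.2) s

lemma chainL_append (A B : List (List Char × List Char)) (s : List Char) :
    chainL (A ++ B) s = chainL B (chainL A s) := List.foldl_append

lemma chain_nil : ∀ (T : List (List Char × List Char)), goodTable T = true → chainL T [] = [] := by
  intro T
  induction T with
  | nil => intro _; rfl
  | cons kv T ih =>
    intro h
    simp only [goodTable, List.all_cons, Bool.and_eq_true] at h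
    obtain ⟨k1ne, _, _⟩ := goodPair_spec kv h.1
    show chainL T (PySem.Chars.replace [] kv.1 kv.2) = []
    rw [replace_nil _ _ k1ne]
    exact ih h.2

lemma chain_sym : ∀ (T : List (List Char × List Char)), goodTable T = true →
    ∀ (x : Char) (Y : List Char), keyChar x = false → chainL T (x :: Y) = x :: chainL T Y := by
  intro T
  induction T with
  | nil => intro _ x Y _; rfl
  | cons kv T ih =>
    intro h x Y hx
    simp only [goodTable, List.all_cons, Bool.and_eq_true] at h
    obtain ⟨k1ne, k1all, _⟩ := goodPair_spec kv h.1
    show chainL T (PySem.Chars.replace (x::Y) kv.1 kv.2) = x :: chainL T (PySem.Chars.replace Y kv.1 kv.2)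
    rw [replace_cons_neg _ _ _ _ k1ne (key_not_prefix_sym kv.1 x Y k1ne k1all hx)]
    exact ih h.2 x _ hx

lemma chain_cons : ∀ (T : List (List Char × List Char)), goodTable T = true →
    ∀ (c : Char) (t : List Char), (∀ kv ∈ T, ¬ kv.1 <+: (c::t)) →
    chainL T (c::t) = c :: chainL T t := by
  intro T
  induction T with
  | nil => intro _ c t _; rfl
  | cons kv T ih =>
    intro h c t hnp
    simp only [goodTable, List.all_cons, Bool.and_eq_true] at h
    obtain ⟨k1ne, k1all, x, hv, hx⟩ := goodPair_spec kv h.1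
    show chainL T (PySem.Chars.replace (c::t) kv.1 kv.2) = c :: chainL T (PySem.Chars.replace t kv.1 kv.2)
    rw [replace_cons_neg _ _ _ _ k1ne (hnp kv List.mem_cons_self)]
    rw [hv]
    rw [ih h.2 c _ ?_]
    intro kv' hm'
    obtain ⟨k1ne', k1all', _⟩ := goodPair_spec kv' (List.all_eq_true.mp h.2 kv' hm')
    exact not_prefix_cons_replace kv.1 x c t kv'.1 k1ne hx k1ne' k1all'
      (hnp kv' (List.mem_cons_of_mem _ hm'))

lemma replace_front : ∀ (ki k v : List Char), k ≠ [] → noStraddle k ki = true →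
    ∀ r, PySem.Chars.replace (ki ++ r) k v = ki ++ PySem.Chars.replace r k v := by
  intro ki
  induction ki with
  | nil => intro k v _ _ r; rfl
  | cons a ki ih =>
    intro k v hk hns r
    obtain ⟨h1, h2⟩ := noStraddle_zero (by simp) hns
    have hnp : ¬ k <+: (a::ki) ++ r := not_prefix_append h2 h1 r
    rw [List.cons_append, replace_cons_neg _ _ _ _ hk (by simpa [List.cons_append] using hnp)]
    rw [ih k v hk (noStraddle_tail hns) r]
    rfl

lemma chain_front (ki : List Char) : ∀ (T : List (List Char × List Char)),
    (∀ kv ∈ T, kv.1 ≠ [] ∧ noStraddle kv.1 ki = true) →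
    ∀ r, chainL T (ki ++ r) = ki ++ chainL T r := by
  intro T
  induction T with
  | nil => intro _ r; rfl
  | cons kv T ih =>
    intro h r
    obtain ⟨hk, hns⟩ := h kv List.mem_cons_self
    show chainL T (PySem.Chars.replace (ki ++ r) kv.1 kv.2) = ki ++ chainL T (PySem.Chars.replace r kv.1 kv.2)
    rw [replace_front ki kv.1 kv.2 hk hns r]
    exact ih (fun kv' hm => h kv' (List.mem_cons_of_mem _ hm)) _

-- ---- pvScan unfolding ----

lemma pvScan_nil : pvScan [] = [] := by rw [pvScan]

lemma pvScan_cons_none (c : Char) (t : List Char)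
    (hf : pvTable.find? (fun kv => kv.1.isPrefixOf (c :: t)) = none) :
    pvScan (c::t) = c :: pvScan t := by
  rw [pvScan.eq_def]
  split
  · exact absurd hf (by simp_all)
  · rename_i heq
    split <;> simp_all

lemma pvScan_cons_some (c : Char) (t : List Char) (kv : List Char × List Char)
    (hf : pvTable.find? (fun kv => kv.1.isPrefixOf (c :: t)) = some kv) :
    pvScan (c::t) = kv.2 ++ pvScan (List.drop kv.1.length (c::t)) := by
  rw [pvScan.eq_def]
  split
  · exact absurd hf (by simp_all)
  · rename_i heq
    split <;> simp_all

-- ---- main lemma ----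

lemma chain_eq_scan : ∀ (n : Nat) (s : List Char), s.length ≤ n → chainL pvTable s = pvScan s := by
  intro n
  induction n using Nat.strong_induction_on with
  | _ n ih =>
    intro s hs
    cases s with
    | nil => rw [chain_nil pvTable good_pvTable, pvScan_nil]
    | cons c t =>
      cases hf : pvTable.find? (fun kv => kv.1.isPrefixOf (c :: t)) with
      | none =>
        have hnone : ∀ kv ∈ pvTable, ¬ kv.1 <+: (c::t) := by
          intro kv hm
          have := List.find?_eq_none.mp hf kv hm
          simpa [List.isPrefixOf_iff_prefix] using this
        have hlt : t.length < n := by simp at hs; omega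
        rw [chain_cons pvTable good_pvTable c t hnone, ih t.length hlt t le_rfl,
            pvScan_cons_none c t hf]
      | some kv =>
        obtain ⟨hpkv, T1, T2, hsplit, hfail⟩ := List.find?_eq_some_iff_append.mp hf
        have hmem : kv ∈ pvTable := hsplit ▸ List.mem_append_right T1 List.mem_cons_self
        obtain ⟨k1ne, k1all, x, hv, hx⟩ := good_mem hmem
        have hpre : kv.1 <+: (c::t) := List.isPrefixOf_iff_prefix.mp hpkv
        obtain ⟨r, hr⟩ := hpre
        have hrlen : r.length < n := by
          have h1 : 0 < kv.1.length := by
            cases hk : kv.1 with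
            | nil => exact absurd hk k1ne
            | cons a l => simp
          have h2 := congrArg List.length hr
          simp only [List.length_append, List.length_cons] at h2
          simp only [List.length_cons] at hs
          omega
        have hgT2 : goodTable T2 = true := by
          apply List.all_eq_true.mpr
          intro kv' hm'
          exact List.all_eq_true.mp good_pvTable kv'
            (hsplit ▸ List.mem_append_right T1 (List.mem_cons_of_mem _ hm'))
        have hT1 : ∀ kv' ∈ T1, kv'.1 ≠ [] ∧ noStraddle kv'.1 kv.1 = true := by
          intro kv' hm'
          have hm'p : kv' ∈ pvTable := hsplit ▸ List.mem_append_left _ hm'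
          obtain ⟨hne', _, _⟩ := good_mem hm'p
          refine ⟨hne', ?_⟩
          rcases sep_mem hm'p hmem with heq | hns
          · exfalso
            have hh := hfail kv' hm'
            rw [heq] at hh
            simp [hpkv] at hh
          · exact hns
        calc chainL pvTable (c::t)
            = chainL (T1 ++ kv :: T2) (kv.1 ++ r) := by rw [hr, hsplit]
          _ = chainL (kv :: T2) (chainL T1 (kv.1 ++ r)) := chainL_append _ _ _
          _ = chainL (kv :: T2) (kv.1 ++ chainL T1 r) := by rw [chain_front kv.1 T1 hT1 r]
          _ = chainL T2 (PySem.Chars.replace (kv.1 ++ chainL T1 r) kv.1 kv.2) := rfl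
          _ = chainL T2 (kv.2 ++ PySem.Chars.replace (chainL T1 r) kv.1 kv.2) := by
                rw [replace_append_pos _ _ _ k1ne]
          _ = x :: chainL T2 (PySem.Chars.replace (chainL T1 r) kv.1 kv.2) := by
                rw [hv]; exact chain_sym T2 hgT2 x _ hx
          _ = x :: chainL (kv :: T2) (chainL T1 r) := rfl
          _ = x :: chainL (T1 ++ kv :: T2) r := by rw [chainL_append]
          _ = x :: chainL pvTable r := by rw [← hsplit]
          _ = x :: pvScan r := by rw [ih r.length hrlen r le_rfl]
          _ = pvScan (c::t) := by
                rw [pvScan_cons_some c t kv hf, hv, ← hr, List.drop_left]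
                rfl

-- ===== VERDICT (by name: the statement is the Claim_ definition above) =====
theorem process_spoken_text_spec : Claim_equal_process_spoken_text := by
  intro text _
  show process_spoken_text text = process_spoken_text_alt text
  have hA : process_spoken_text text = String.ofList (chainL pvTable text.toList) := by
    simp [process_spoken_text, pvReplacements, chainL, pvTable, PySem.Str.replace, List.foldl]
  rw [hA, process_spoken_text_alt, chain_eq_scan text.toList.length text.toList le_rfl]
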